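-- pv_equiv track=rewrite | github.com/data-mermaid/mermaid-segmentation | mermaidseg/datasets/concepts.py | get_hierarchy_level
-- ===== SOURCE A (Python) =====
-- def get_hierarchy_level(
--     concept_list: list[str], hierarchy_dict: dict[str, str]
-- ) -> dict[str, int | None]:
--     """
--     Determine the hierarchy level for each concept in a list based on a parent mapping.
--     The function calculates the level of each concept by counting the number of
--     steps required to reach a root node (a node with no parent) using the provided
--     hierarchy dictionary. If a cycle is detected in the hierarchy, the level for that
--     concept is set to None.
--     Args:
--         concept_list: A list of concept labels (strings) for which to determine levels.
--         hierarchy_dict: A mapping (e.g., dict) where each key is a concept label and its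
--             value is the parent concept label or None to indicate the top of the hierarchy.
--     Returns:
--         dict: A dictionary mapping each concept label to its hierarchy level (int) or
--         None if a cycle is detected.
--     """
--     levels = {}
--     for col in concept_list:
--         level = 0
--         current = col
--         visited = {current}
--         while True:
--             parent = hierarchy_dict.get(current)
--             # stop if no parent recorded
--             if parent is None:
--                 break
--             # detect cycles
--             if parent in visited:
--                 level = None  # indicate cycle
--                 break
--             level += 1
--             visited.add(parent)
--             # if parent exists but we don't have its parent info, count it and stop
--             if parent not in hierarchy_dict:
--                 break
--             current = parent
--         levels[col] = level
--     return levels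
-- ===== SOURCE B (Python) =====
-- def _chain_level(node, hierarchy_dict, budget):
--     # Chase the parent chain, counting steps; a chain that makes more parent-to-key
--     # hops than there are keys must have looped, so a countdown budget replaces the
--     # visited set for cycle detection.
--     steps = 0
--     while True:
--         parent = hierarchy_dict.get(node)
--         if parent is None:
--             return steps
--         if parent not in hierarchy_dict:
--             return steps + 1
--         if budget == 0:
--             return None  # cycle
--         node, steps, budget = parent, steps + 1, budget - 1
--
--
-- def get_hierarchy_level(concept_list, hierarchy_dict):
--     budget = len(hierarchy_dict)
--     levels = {}
--     for col in concept_list: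
--         levels[col] = _chain_level(col, hierarchy_dict, budget)
--     return levels
-- ===== Notes on version B (the rewrite author's own statement) =====
-- stated objective: alternative
-- what changed: Cycle detection by a step budget of len(hierarchy_dict) (a chain making more key-to-key hops than there are keys must loop) instead of building and testing a per-walk visited set, with the walk factored into a plain parent-chase helper.
import Mathlib
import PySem

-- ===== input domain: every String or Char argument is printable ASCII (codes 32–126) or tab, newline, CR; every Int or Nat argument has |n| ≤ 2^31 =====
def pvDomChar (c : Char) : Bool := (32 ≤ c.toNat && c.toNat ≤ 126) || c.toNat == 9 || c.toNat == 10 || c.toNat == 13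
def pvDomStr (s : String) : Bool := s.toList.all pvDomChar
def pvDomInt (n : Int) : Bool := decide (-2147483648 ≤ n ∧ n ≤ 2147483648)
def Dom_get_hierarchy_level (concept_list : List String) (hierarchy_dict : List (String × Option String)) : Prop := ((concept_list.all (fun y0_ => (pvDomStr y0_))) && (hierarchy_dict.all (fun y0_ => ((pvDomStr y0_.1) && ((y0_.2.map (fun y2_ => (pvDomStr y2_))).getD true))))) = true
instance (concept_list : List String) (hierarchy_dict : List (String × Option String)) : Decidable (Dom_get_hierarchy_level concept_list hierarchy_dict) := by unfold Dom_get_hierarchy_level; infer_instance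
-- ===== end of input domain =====

-- B replaces A's per-concept visited-set walk by a plain parent chase with a step
-- budget of len(hierarchy_dict) (a chain making more key-to-key hops must loop),
-- an alternative cycle-detection mechanism with no set maintenance.

-- general: filter length strictly drops when the predicate weakens and strictly fails at a member
theorem pvFilter_lt {α} (p q : α → Bool) : ∀ (l : List α), (∀ a ∈ l, p a = true → q a = true) →
    ∀ a, a ∈ l → q a = true → p a = false →
    (l.filter p).length < (l.filter q).length := by
  intro l
  induction l with
  | nil => intro _ a ha; simp at ha
  | cons x xs ih =>
    intro himp a ha hq hp
    have himp' : ∀ a ∈ xs, p a = true → q a = true := fun a h => himp a (List.mem_cons_of_mem _ h)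
    have hle : (xs.filter p).length ≤ (xs.filter q).length := by
      rw [← List.countP_eq_length_filter, ← List.countP_eq_length_filter]
      exact List.countP_mono_left himp'
    rcases List.mem_cons.mp ha with rfl | hmem
    · simp [hp, hq]; omega
    · have hlt := ih himp' a hmem hq hp
      by_cases hx : p x = true
      · have hqx := himp x List.mem_cons_self hx
        simp [hx, hqx]; omega
      · simp only [Bool.not_eq_true] at hx
        rcases hqx : q x with _ | _ <;> simp [hx, hqx] <;> omega

theorem pvLookup_mem {p : String} : ∀ {d : List (String × Option String)},
    (d.lookup p).isSome = true → ∃ v, (p, v) ∈ d := by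
  intro d
  induction d with
  | nil => intro h; simp [List.lookup] at h
  | cons kv tl ih =>
    intro h
    obtain ⟨k, v⟩ := kv
    by_cases hk : p == k
    · exact ⟨v, by simp [List.mem_cons, eq_of_beq hk]⟩
    · simp only [List.lookup, hk] at h
      obtain ⟨w, hw⟩ := ih h
      exact ⟨w, List.mem_cons_of_mem _ hw⟩

-- termination measure for A's while-loop: dict entries whose key is not yet visited
def pvKeysLeft (d : List (String × Option String)) (visited : PySem.Set String) : Nat :=
  (d.filter (fun kv => !(PySem.Set.contains visited kv.1))).length

-- cited by the port's decreasing_by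
theorem pvKeysLeft_lt (d : List (String × Option String)) (V : PySem.Set String) (p : String)
    (hk : (d.lookup p).isSome = true) (hv : PySem.Set.contains V p = false) :
    pvKeysLeft d (PySem.Set.add V p) < pvKeysLeft d V := by
  obtain ⟨v, hvmem⟩ := pvLookup_mem hk
  apply pvFilter_lt _ _ d _ (p, v) hvmem
  · simp only [Bool.not_eq_true']
    exact hv
  · simp [PySem.Set.mem_add]
  · intro a _ ha
    simp only [Bool.not_eq_true'] at ha ⊢
    rcases hca : PySem.Set.contains V a.1 with _ | _
    · rfl
    · exfalso
      have hmem := (PySem.Set.contains_iff _ _).mp hca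
      have hc : PySem.Set.contains (PySem.Set.add V p) a.1 = true :=
        (PySem.Set.contains_iff _ _).mpr ((PySem.Set.mem_add _ _ _).mpr (Or.inl hmem))
      rw [hc] at ha; cases ha

-- ===== PORT A =====
-- the while-loop of A: state (visited, current, level); breaks return the final level
def pvWalkA (d : List (String × Option String)) (visited : PySem.Set String)
    (current : String) (level : Int) : Option Int :=
  match (d.lookup current).join with               -- parent = hierarchy_dict.get(current)
  | none => some level                             -- no parent recorded: break
  | some parent =>
    if hmem : PySem.Set.contains visited parent = true then none   -- cycle: level = None
    else if hkey : (d.lookup parent).isSome = true then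
      pvWalkA d (PySem.Set.add visited parent) parent (level + 1)  -- current = parent
    else some (level + 1)                          -- parent not in dict: count it, stop
termination_by pvKeysLeft d visited
decreasing_by exact pvKeysLeft_lt d visited parent hkey (by simpa using hmem)

def get_hierarchy_level (concept_list : List String) (hierarchy_dict : List (String × Option String)) : List (String × Option Int) :=
  (concept_list.foldl
    (fun (levels : PySem.Dict String (Option Int)) col =>
      PySem.Dict.insert levels col
        (pvWalkA hierarchy_dict (PySem.Set.add PySem.Set.empty col) col 0))
    PySem.Dict.empty).items

-- ===== PORT B =====
-- Source B's _chain_level while-loop: state (node, steps, budget); structural on the budget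
def pvChainLevelB (d : List (String × Option String)) (node : String) (steps : Int) (budget : Nat) : Option Int :=
  match (d.lookup node).join with                 -- parent = hierarchy_dict.get(node)
  | none => some steps                            -- return steps
  | some parent =>
    if (d.lookup parent).isSome = true then
      match budget with
      | 0 => none                                 -- budget exhausted: cycle
      | b + 1 => pvChainLevelB d parent (steps + 1) b
    else some (steps + 1)                         -- parent not in dict
termination_by budget
decreasing_by omega

def get_hierarchy_level_alt (concept_list : List String) (hierarchy_dict : List (String × Option String)) : List (String × Option Int) :=
  (concept_list.foldl
    (fun (levels : PySem.Dict String (Option Int)) col =>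
      PySem.Dict.insert levels col
        (pvChainLevelB hierarchy_dict col 0 hierarchy_dict.length))
    PySem.Dict.empty).items

-- ===== PRECONDITION & SPEC =====
def Spec_get_hierarchy_level (concept_list : List String) (hierarchy_dict : List (String × Option String)) (out : List (String × Option Int)) : Prop := out = get_hierarchy_level_alt concept_list hierarchy_dict
instance (concept_list : List String) (hierarchy_dict : List (String × Option String)) (out : List (String × Option Int)) : Decidable (Spec_get_hierarchy_level concept_list hierarchy_dict out) := by unfold Spec_get_hierarchy_level; infer_instance

-- ===== CLAIM (what is proved, stated in full; the proofs are below) =====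
def Claim_equal_get_hierarchy_level : Prop := ∀ (concept_list : List String) (hierarchy_dict : List (String × Option String)), Dom_get_hierarchy_level concept_list hierarchy_dict → Spec_get_hierarchy_level concept_list hierarchy_dict (get_hierarchy_level concept_list hierarchy_dict)

-- ===== LEMMAS AND PROOFS =====

-- the one-step parent function and reachability along it
def pvPchain (d : List (String × Option String)) (x : String) : Option String := (d.lookup x).join
def pvReaches (d : List (String × Option String)) (a b : String) : Prop :=
  Relation.TransGen (fun x y => pvPchain d x = some y) a b

theorem pvKey_of_pchain (d : List (String × Option String)) (x p : String)
    (h : pvPchain d x = some p) : (d.lookup x).isSome = true := by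
  unfold pvPchain at h
  cases hl : d.lookup x with
  | none => rw [hl] at h; simp at h
  | some v => rfl

-- on a node lying on a cycle B exhausts any budget and returns none
theorem pvB_cyc (d : List (String × Option String)) :
    ∀ (b : Nat) (x : String) (s : Int), pvReaches d x x → pvChainLevelB d x s b = none := by
  intro b
  induction b with
  | zero =>
    intro x s hcyc
    obtain ⟨c, hc, hrest⟩ := Relation.TransGen.head'_iff.mp hcyc
    have hccyc : pvReaches d c c := Relation.TransGen.tail' hrest hc
    obtain ⟨c2, hc2, -⟩ := Relation.TransGen.head'_iff.mp hccyc
    rw [pvChainLevelB.eq_def]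
    simp only [show (d.lookup x).join = some c from hc]
    rw [if_pos (pvKey_of_pchain d c c2 hc2)]
  | succ n ih =>
    intro x s hcyc
    obtain ⟨c, hc, hrest⟩ := Relation.TransGen.head'_iff.mp hcyc
    have hccyc : pvReaches d c c := Relation.TransGen.tail' hrest hc
    obtain ⟨c2, hc2, -⟩ := Relation.TransGen.head'_iff.mp hccyc
    rw [pvChainLevelB.eq_def]
    simp only [show (d.lookup x).join = some c from hc]
    rw [if_pos (pvKey_of_pchain d c c2 hc2)]
    exact ih c (s + 1) hccyc

-- main: A's visited-set walk equals B's budgeted chase, threading the chain invariant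
theorem pvMain (d : List (String × Option String)) :
    ∀ (b : Nat) (V : PySem.Set String) (cur : String) (s : Int),
      (∀ v ∈ V, v = cur ∨ pvReaches d v cur) → cur ∈ V → pvKeysLeft d V ≤ b →
      pvWalkA d V cur s = pvChainLevelB d cur s b := by
  intro b
  induction b with
  | zero =>
    intro V cur s hV hcur hb
    rw [pvWalkA.eq_def, pvChainLevelB.eq_def]
    cases hpc : (d.lookup cur).join with
    | none => rfl
    | some p =>
      simp only []
      have hstep : pvPchain d cur = some p := hpc
      by_cases hmem : PySem.Set.contains V p = true
      · -- cycle for A; show it is a cycle for B too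
        rw [dif_pos hmem]
        have hpV : p ∈ V := (PySem.Set.contains_iff _ _).mp hmem
        have hcyc : pvReaches d p p := by
          rcases hV p hpV with rfl | hr
          · exact Relation.TransGen.single hstep
          · exact Relation.TransGen.tail hr hstep
        obtain ⟨c2, hc2, -⟩ := Relation.TransGen.head'_iff.mp hcyc
        rw [if_pos (pvKey_of_pchain d p c2 hc2)]
      · rw [dif_neg hmem]
        by_cases hkey : (d.lookup p).isSome = true
        · -- A would continue, but then pvKeysLeft strictly drops below 0: impossible
          exfalso
          have hcf : PySem.Set.contains V p = false := by simpa using hmem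
          have := pvKeysLeft_lt d V p hkey hcf
          omega
        · rw [dif_neg hkey, if_neg hkey]
  | succ n ih =>
    intro V cur s hV hcur hb
    rw [pvWalkA.eq_def, pvChainLevelB.eq_def]
    cases hpc : (d.lookup cur).join with
    | none => rfl
    | some p =>
      simp only []
      have hstep : pvPchain d cur = some p := hpc
      by_cases hmem : PySem.Set.contains V p = true
      · rw [dif_pos hmem]
        have hpV : p ∈ V := (PySem.Set.contains_iff _ _).mp hmem
        have hcyc : pvReaches d p p := by
          rcases hV p hpV with rfl | hr
          · exact Relation.TransGen.single hstep
          · exact Relation.TransGen.tail hr hstep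
        obtain ⟨c2, hc2, -⟩ := Relation.TransGen.head'_iff.mp hcyc
        rw [if_pos (pvKey_of_pchain d p c2 hc2)]
        exact (pvB_cyc d n p (s + 1) hcyc).symm
      · rw [dif_neg hmem]
        by_cases hkey : (d.lookup p).isSome = true
        · rw [dif_pos hkey, if_pos hkey]
          have hcf : PySem.Set.contains V p = false := by simpa using hmem
          have hlt := pvKeysLeft_lt d V p hkey hcf
          apply ih (PySem.Set.add V p) p (s + 1)
          · intro v hv
            rcases (PySem.Set.mem_add _ _ _).mp hv with hv' | rfl
            · rcases hV v hv' with rfl | hr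
              · exact Or.inr (Relation.TransGen.single hstep)
              · exact Or.inr (Relation.TransGen.tail hr hstep)
            · exact Or.inl rfl
          · exact (PySem.Set.mem_add _ _ _).mpr (Or.inr rfl)
          · omega
        · rw [dif_neg hkey, if_neg hkey]

theorem pvKeysLeft_le_len (d : List (String × Option String)) (V : PySem.Set String) :
    pvKeysLeft d V ≤ d.length := List.length_filter_le _ _

theorem pvWalk_eq_chain (d : List (String × Option String)) (col : String) :
    pvWalkA d (PySem.Set.add PySem.Set.empty col) col 0 = pvChainLevelB d col 0 d.length := by
  apply pvMain d d.length (PySem.Set.add PySem.Set.empty col) col 0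
  · intro v hv
    rcases (PySem.Set.mem_add _ _ _).mp hv with hv' | rfl
    · simp [PySem.Set.empty] at hv'
    · exact Or.inl rfl
  · exact (PySem.Set.mem_add _ _ _).mpr (Or.inr rfl)
  · exact pvKeysLeft_le_len d _

-- ===== VERDICT (by name: the statement is the Claim_ definition above) =====
theorem get_hierarchy_level_spec : Claim_equal_get_hierarchy_level := by
  intro concept_list hierarchy_dict _
  unfold Spec_get_hierarchy_level get_hierarchy_level get_hierarchy_level_alt
  congr 1
  apply PySem.List.foldl_congr_mem
  intro levels col _
  rw [pvWalk_eq_chain]
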